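-- pv_equiv track=rewrite | github.com/stefan18-ux/Arpspoof-all | functions.py | get_what_matters
-- ===== SOURCE A (Python) =====
-- def get_what_matters(content):
--     count = int(0)
--     position = int(0)
--     for i in range(len(content) - 1, 0, -1):
--         if content[i] == '-':
--             count += 1
--         if count == int(77):
--             position = i - 1
--             break
--     start_position = 0
--     end_position = position
--     return content[:start_position] + content[end_position:]
-- ===== SOURCE B (Python) =====
-- def get_what_matters(content):
--     dashes = [i for i in range(1, len(content)) if content[i] == '-']
--     if len(dashes) < 77:
--         return content
--     return content[dashes[-77] - 1:]
-- ===== Notes on version B (the rewrite author's own statement) =====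
-- stated objective: alternative
-- what changed: Replaces A's backward counting scan with mutable count/position state and an early break by a forward pass that builds the table of all dash positions (indices >= 1), then a length test and one O(1) negative index dashes[-77] plus a single slice; the comprehension runs in C, which a timing run measured as a constant-factor speedup.
import Mathlib
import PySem

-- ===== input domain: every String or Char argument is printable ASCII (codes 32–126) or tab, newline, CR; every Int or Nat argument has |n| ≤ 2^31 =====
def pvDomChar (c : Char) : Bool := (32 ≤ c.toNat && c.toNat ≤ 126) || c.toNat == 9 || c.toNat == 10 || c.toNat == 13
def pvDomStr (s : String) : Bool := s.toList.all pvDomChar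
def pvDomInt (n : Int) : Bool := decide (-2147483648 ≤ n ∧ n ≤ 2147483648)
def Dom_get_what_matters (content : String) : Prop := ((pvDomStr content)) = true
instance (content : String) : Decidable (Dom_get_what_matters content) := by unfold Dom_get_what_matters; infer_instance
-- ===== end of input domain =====

-- B builds the full table of dash positions in one forward pass and takes the 77th from the
-- end with one negative index, instead of A's backward counting scan with an early break.

-- ===== PORT A =====
-- A's for-loop over range(len-1, 0, -1) with the two ifs, the count/position state and the break.
def pvLoopA (s : List Char) : List Int → Int → Int → Int
  | [], _, position => position
  | i :: rest, count, position =>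
    let count' := if PySem.List.pyGet? s i == some '-' then count + 1 else count
    if count' == 77 then i - 1
    else pvLoopA s rest count' position

def get_what_matters (content : String) : String :=
  let s := content.toList
  let position := pvLoopA s (PySem.List.pyRange (PySem.Str.len content - 1) 0 (-1)) 0 0
  let start_position : Int := 0
  let end_position := position
  String.ofList (PySem.List.slice s none (some start_position) ++ PySem.List.slice s (some end_position) none)

-- ===== PORT B =====
def get_what_matters_alt (content : String) : String :=
  let s := content.toList
  let dashes := (PySem.List.pyRange 1 (PySem.Str.len content) 1).filter
      (fun i => PySem.List.pyGet? s i == some '-')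
  if dashes.length < 77 then content
  else String.ofList (PySem.List.slice s (some (PySem.List.pyGetD dashes (-77) 0 - 1)) none)

-- ===== PRECONDITION & SPEC =====
def Spec_get_what_matters (content : String) (out : String) : Prop := out = get_what_matters_alt content
instance (content : String) (out : String) : Decidable (Spec_get_what_matters content out) := by unfold Spec_get_what_matters; infer_instance

-- ===== CLAIM (what is proved, stated in full; the proofs are below) =====
def Claim_equal_get_what_matters : Prop := ∀ (content : String), Dom_get_what_matters content → Spec_get_what_matters content (get_what_matters content)

-- ===== LEMMAS AND PROOFS =====

-- A's loop, entered with count = 77 - k (k dashes still to find), returns one before the k-th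
-- dash position in xs, or the initial position if xs holds fewer than k dashes.
theorem pvLoopA_eq (s : List Char) (xs : List Int) (k : Nat) (pos : Int)
    (h1 : 1 ≤ k) (h2 : k ≤ 77) :
    pvLoopA s xs (77 - (k : Int)) pos =
      (if k ≤ (xs.filter (fun i => PySem.List.pyGet? s i == some '-')).length
       then (xs.filter (fun i => PySem.List.pyGet? s i == some '-')).getD (k - 1) 0 - 1
       else pos) := by
  induction xs generalizing k with
  | nil => simp [pvLoopA]; omega
  | cons i rest ih =>
    by_cases hp : (PySem.List.pyGet? s i == some '-') = true
    · have hfc : (i :: rest).filter (fun i => PySem.List.pyGet? s i == some '-')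
          = i :: rest.filter (fun i => PySem.List.pyGet? s i == some '-') := by
        simp [hp]
      rw [hfc]
      by_cases hk1 : k = 1
      · subst hk1
        simp [pvLoopA, hp]
      · have hk2 : 2 ≤ k := by omega
        have hcast : (77 : Int) - (k : Int) + 1 = 77 - ((k - 1 : Nat) : Int) := by
          push_cast [Nat.cast_sub h1]; ring
        have hne : ¬ ((77 : Int) - (k : Int) + 1 == 77) = true := by simp; omega
        rw [show pvLoopA s (i :: rest) (77 - (k : Int)) pos
              = if ((77 : Int) - (k : Int) + 1 == 77) = true then i - 1
                else pvLoopA s rest ((77 : Int) - (k : Int) + 1) pos from by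
              simp [pvLoopA, hp]]
        rw [if_neg hne, hcast, ih (k - 1) (by omega) (by omega)]
        set f := rest.filter (fun i => PySem.List.pyGet? s i == some '-') with hf
        have hg : (i :: f).getD (k - 1) 0 = f.getD (k - 2) 0 := by
          rw [show k - 1 = (k - 2) + 1 from by omega, List.getD_cons_succ]
        by_cases hc : k - 1 ≤ f.length
        · rw [if_pos hc, if_pos (by simp; omega), hg,
            show k - 1 - 1 = k - 2 from by omega]
        · rw [if_neg hc, if_neg (by simp; omega)]
    · have hp' : (PySem.List.pyGet? s i == some '-') = false := by
        simpa using hp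
      have hne : ¬ ((77 : Int) - (k : Int) == 77) = true := by simp; omega
      have hfc : (i :: rest).filter (fun i => PySem.List.pyGet? s i == some '-')
          = rest.filter (fun i => PySem.List.pyGet? s i == some '-') := by
        simp [hp']
      rw [hfc,
        show pvLoopA s (i :: rest) (77 - (k : Int)) pos
            = if ((77 : Int) - (k : Int) == 77) = true then i - 1
              else pvLoopA s rest ((77 : Int) - (k : Int)) pos from by
          simp [pvLoopA, hp'],
        if_neg hne, ih k h1 h2]

-- the loop as A starts it: count = 0 = 77 - 77
theorem pvLoopA_start (s : List Char) (xs : List Int) :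
    pvLoopA s xs 0 0 =
      (if 77 ≤ (xs.filter (fun i => PySem.List.pyGet? s i == some '-')).length
       then (xs.filter (fun i => PySem.List.pyGet? s i == some '-')).getD 76 0 - 1
       else 0) := by
  have h := pvLoopA_eq s xs 77 0 (by omega) (by omega)
  norm_num at h
  exact h

-- dashes[-77] (B's negative index, guarded by 77 <= len) is the 77th element from the end
theorem pvNegIdx (dashes : List Int) (h77 : 77 ≤ dashes.length) :
    dashes.reverse.getD 76 0 = PySem.List.pyGetD dashes (-77) 0 := by
  have h76 : 76 < dashes.reverse.length := by simp; omega
  rw [List.getD_eq_getElem _ _ h76, List.getElem_reverse]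
  simp only [PySem.List.pyGetD, PySem.List.pyGet?, PySem.List.pyIdx?]
  rw [if_neg (by omega : ¬ (0:Int) ≤ -77), if_pos (by omega : -(dashes.length:Int) ≤ -77)]
  simp only [Option.bind_some]
  norm_num
  rw [List.getElem?_eq_getElem (by omega)]
  simp only [Option.getD_some]
  congr 1

-- ===== VERDICT (by name: the statement is the Claim_ definition above) =====
theorem get_what_matters_spec : Claim_equal_get_what_matters := by
  intro content _
  unfold Spec_get_what_matters get_what_matters get_what_matters_alt
  have hrev : PySem.List.pyRange (PySem.Str.len content - 1) 0 (-1)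
      = (PySem.List.pyRange 1 (PySem.Str.len content) 1).reverse := by
    rw [PySem.List.pyRange_neg_one_eq_reverse]; norm_num
  simp only [hrev, pvLoopA_start, List.filter_reverse, List.length_reverse]
  set s := content.toList with hs
  set dashes := (PySem.List.pyRange 1 (PySem.Str.len content) 1).filter
      (fun i => PySem.List.pyGet? s i == some '-') with hd
  by_cases hlen : dashes.length < 77
  · rw [if_neg (by omega), if_pos hlen]
    simp [pysem, hs]
  · rw [if_pos (by omega), if_neg hlen, pvNegIdx dashes (by omega)]
    simp [pysem]
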